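-- pv_equiv track=rewrite | github.com/AlexanderFastner/jh_bioinformatics | biopython/algo_1.py | naive_2mm
-- ===== SOURCE A (Python) =====
-- def naive_2mm(p, t):
--     occurrences = []
--     mm = 0
--     for i in range(len(t) - len(p) + 1):  # loop over alignments
--         match = True
--         for j in range(len(p)):  # loop over characters
--             if t[i+j] != p[j]:  # compare characters
--                 mm +=1
--             if mm > 2:
--                 mm = 0
--                 match = False
--                 break
--         if match:
--             occurrences.append(i)  # all chars matched; record
--             mm = 0
--     return occurrences
-- ===== SOURCE B (Python) =====
-- def naive_2mm(p, t):
--     # Transposed scan: one pass per pattern position updating a mismatch-count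
--     # table over all alignments, then collect alignments with <= 2 mismatches.
--     counts = [0] * (len(t) - len(p) + 1)
--     for j, pj in enumerate(p):
--         counts = [c + (t[i + j] != pj) for i, c in enumerate(counts)]
--     return [i for i, c in enumerate(counts) if c <= 2]
-- ===== Notes on version B (the rewrite author's own statement) =====
-- stated objective: alternative
-- what changed: Replaces A's per-alignment inner scan with mutable mismatch counter and early break by a transposed algorithm: one pass per pattern position updating a mismatch-count table over all alignments at once, then a final filter of alignments with count <= 2.
import Mathlib
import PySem

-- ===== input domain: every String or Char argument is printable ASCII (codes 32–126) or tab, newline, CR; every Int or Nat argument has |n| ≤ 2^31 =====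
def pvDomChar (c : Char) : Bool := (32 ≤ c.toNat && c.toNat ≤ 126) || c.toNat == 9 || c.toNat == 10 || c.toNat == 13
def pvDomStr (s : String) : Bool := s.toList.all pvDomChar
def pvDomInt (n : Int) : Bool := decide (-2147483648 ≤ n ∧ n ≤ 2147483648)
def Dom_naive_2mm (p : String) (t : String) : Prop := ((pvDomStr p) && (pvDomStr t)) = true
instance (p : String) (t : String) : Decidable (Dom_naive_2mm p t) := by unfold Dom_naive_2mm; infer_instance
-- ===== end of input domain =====

-- B replaces A's per-alignment scan (mutable mismatch counter + early break) by a
-- transposed algorithm: one pass per pattern position updating a mismatch-count table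
-- over all alignments, then a final filter; same asymptotic cost, alternative structure.

-- ===== PORT A =====
-- inner 'for j in range(len(p))' loop with its break; state (mm, match).
-- t[i+j] and p[j] are always in range at every reachable call, so comparing the
-- pyGet? options is exact Python behaviour (no IndexError is reachable).
def naiveInnerA (pl tl : List Char) (i : Int) (mm : Int) : List Int → Int × Bool
  | [] => (mm, true)
  | j :: js =>
    let mm := if PySem.List.pyGet? tl (i + j) ≠ PySem.List.pyGet? pl j then mm + 1 else mm
    if mm > 2 then (0, false) else naiveInnerA pl tl i mm js

-- outer 'for i in range(len(t)-len(p)+1)' loop; state (occurrences, mm).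
def naiveOuterA (pl tl : List Char) (occ : List Int) (mm : Int) : List Int → List Int
  | [] => occ
  | i :: is =>
    let r := naiveInnerA pl tl i mm (PySem.List.pyRange 0 (pl.length : Int) 1)
    if r.2 then naiveOuterA pl tl (occ ++ [i]) 0 is
    else naiveOuterA pl tl occ r.1 is

def naive_2mm (p : String) (t : String) : List Int :=
  naiveOuterA p.toList t.toList [] 0
    (PySem.List.pyRange 0 ((t.toList.length : Int) - (p.toList.length : Int) + 1) 1)

-- ===== PORT B =====
-- counts = [0]*(len(t)-len(p)+1); for j,pj in enumerate(p): counts = [c + (t[i+j]!=pj) ...];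
-- return [i for i,c in enumerate(counts) if c <= 2].  t[i+j] is always in range here,
-- so the pyGet?-vs-some comparison is exact.
def naive_2mm_alt (p : String) (t : String) : List Int :=
  let pl := p.toList
  let tl := t.toList
  let counts0 : List Int := List.replicate ((tl.length : Int) - (pl.length : Int) + 1).toNat 0
  let counts :=
    (PySem.List.enumerate pl).foldl
      (fun counts jp =>
        (PySem.List.enumerate counts).map
          (fun ic => ic.2 + (if PySem.List.pyGet? tl (ic.1 + jp.1) ≠ some jp.2 then 1 else 0)))
      counts0
  ((PySem.List.enumerate counts).filter (fun ic => ic.2 ≤ 2)).map (·.1)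

-- ===== PRECONDITION & SPEC =====
def Spec_naive_2mm (p : String) (t : String) (out : List Int) : Prop := out = naive_2mm_alt p t
instance (p : String) (t : String) (out : List Int) : Decidable (Spec_naive_2mm p t out) := by unfold Spec_naive_2mm; infer_instance

-- ===== CLAIM (what is proved, stated in full; the proofs are below) =====
def Claim_equal_naive_2mm : Prop := ∀ (p : String) (t : String), Dom_naive_2mm p t → Spec_naive_2mm p t (naive_2mm p t)

-- ===== LEMMAS AND PROOFS =====

-- number of mismatching offsets among js for alignment i
def cntL (pl tl : List Char) (i : Int) (js : List Int) : Int :=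
  ((js.filter (fun j => PySem.List.pyGet? tl (i + j) ≠ PySem.List.pyGet? pl j)).length : Int)

lemma cntL_nil (pl tl : List Char) (i : Int) : cntL pl tl i [] = 0 := rfl

lemma cntL_nonneg (pl tl : List Char) (i : Int) (js : List Int) : 0 ≤ cntL pl tl i js := by
  simp [cntL]

lemma cntL_cons (pl tl : List Char) (i j : Int) (js : List Int) :
    cntL pl tl i (j :: js) =
      (if PySem.List.pyGet? tl (i + j) ≠ PySem.List.pyGet? pl j then 1 else 0) + cntL pl tl i js := by
  by_cases h : PySem.List.pyGet? tl (i + j) ≠ PySem.List.pyGet? pl j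
  · simp [cntL, h]
    ring
  · simp [cntL, h]

lemma cntL_append (pl tl : List Char) (i : Int) (xs ys : List Int) :
    cntL pl tl i (xs ++ ys) = cntL pl tl i xs + cntL pl tl i ys := by
  simp [cntL, List.filter_append]

lemma naiveInnerA_eq (pl tl : List Char) (i : Int) :
    ∀ (js : List Int) (mm : Int), 0 ≤ mm → mm ≤ 2 →
      naiveInnerA pl tl i mm js =
        if mm + cntL pl tl i js > 2 then (0, false) else (mm + cntL pl tl i js, true) := by
  intro js
  induction js with
  | nil =>
    intro mm h0 h2
    rw [cntL_nil, if_neg (by omega : ¬ (mm + 0 > 2))]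
    show (mm, true) = (mm + 0, true)
    norm_num
  | cons j js ih =>
    intro mm h0 h2
    have hnn := cntL_nonneg pl tl i js
    rw [cntL_cons]
    by_cases hmis : PySem.List.pyGet? tl (i + j) ≠ PySem.List.pyGet? pl j
    · rw [show (if PySem.List.pyGet? tl (i + j) ≠ PySem.List.pyGet? pl j then (1 : Int) else 0) = 1 from if_pos hmis]
      have h1 : naiveInnerA pl tl i mm (j :: js) =
          if mm + 1 > 2 then (0, false) else naiveInnerA pl tl i (mm + 1) js := by
        rw [naiveInnerA]; simp [hmis]
      rw [h1]
      by_cases hbig : mm + 1 > 2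
      · rw [if_pos hbig, if_pos (by omega)]
      · rw [if_neg hbig, ih (mm + 1) (by omega) (by omega),
          show mm + 1 + cntL pl tl i js = mm + (1 + cntL pl tl i js) from by ring]
    · rw [show (if PySem.List.pyGet? tl (i + j) ≠ PySem.List.pyGet? pl j then (1 : Int) else 0) = 0 from if_neg hmis]
      have h1 : naiveInnerA pl tl i mm (j :: js) =
          if mm > 2 then (0, false) else naiveInnerA pl tl i mm js := by
        rw [naiveInnerA]; simp [hmis]
      rw [h1, if_neg (by omega : ¬ (mm > 2)), ih mm h0 h2]
      simp

lemma naiveOuterA_eq (pl tl : List Char) :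
    ∀ (is : List Int) (occ : List Int),
      naiveOuterA pl tl occ 0 is =
        occ ++ is.filter
          (fun i => decide (cntL pl tl i (PySem.List.pyRange 0 (pl.length : Int) 1) ≤ 2)) := by
  intro is
  induction is with
  | nil => intro occ; simp [naiveOuterA]
  | cons i is ih =>
    intro occ
    have hnn := cntL_nonneg pl tl i (PySem.List.pyRange 0 (pl.length : Int) 1)
    rw [naiveOuterA, naiveInnerA_eq pl tl i _ 0 (by omega) (by omega)]
    by_cases h : cntL pl tl i (PySem.List.pyRange 0 (pl.length : Int) 1) ≤ 2
    · rw [if_neg (by omega : ¬ (0 + cntL pl tl i (PySem.List.pyRange 0 (pl.length : Int) 1) > 2))]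
      simpa [List.filter_cons, h, List.append_assoc] using ih (occ ++ [i])
    · rw [if_pos (by omega : 0 + cntL pl tl i (PySem.List.pyRange 0 (pl.length : Int) 1) > 2)]
      simpa [List.filter_cons, h] using ih occ

-- per-alignment mismatch count over the first j pattern positions
def cntF (pl tl : List Char) (i : Nat) (j : Nat) : Int :=
  cntL pl tl (i : Int) (PySem.List.pyRange 0 (j : Int) 1)

lemma enumerate_append {α : Type} (xs ys : List α) :
    ∀ (s : Int), PySem.List.enumerate (xs ++ ys) s =
      PySem.List.enumerate xs s ++ PySem.List.enumerate ys (s + xs.length) := by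
  induction xs with
  | nil => intro s; simp [PySem.List.enumerate_nil]
  | cons x xs ih =>
    intro s
    rw [List.cons_append, PySem.List.enumerate_cons, PySem.List.enumerate_cons, ih (s + 1)]
    simp only [List.length_cons, List.cons_append]
    rw [show s + 1 + (xs.length : Int) = s + (((xs.length + 1 : Nat)) : Int) from by push_cast; ring]

lemma enum_map_range {α : Type} (g : Nat → α) :
    ∀ (L : Nat) (s : Int),
      PySem.List.enumerate ((List.range L).map g) s =
        (List.range L).map (fun (k : Nat) => ((s : Int) + (k : Int), g k)) := by
  intro L
  induction L with
  | zero => intro s; simp [PySem.List.enumerate_nil]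
  | succ n ih =>
    intro s
    rw [List.range_succ, List.map_append, List.map_append, enumerate_append, ih s]
    simp [PySem.List.enumerate_cons, PySem.List.enumerate_nil]

lemma foldB_gen (pl tl : List Char) (L : Nat) :
    ∀ (rest : List Char) (j : Nat),
      (∀ k (h : k < rest.length), PySem.List.pyGet? pl ((j : Int) + (k : Int)) = some rest[k]) →
      (PySem.List.enumerate rest (j : Int)).foldl
          (fun counts jp =>
            (PySem.List.enumerate counts).map
              (fun ic => ic.2 + (if PySem.List.pyGet? tl (ic.1 + jp.1) ≠ some jp.2 then 1 else 0)))
          ((List.range L).map (fun i => cntF pl tl i j)) =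
        (List.range L).map (fun i => cntF pl tl i (j + rest.length)) := by
  intro rest
  induction rest with
  | nil => intro j _; simp [PySem.List.enumerate_nil]
  | cons c cs ih =>
    intro j hidx
    rw [PySem.List.enumerate_cons, List.foldl_cons]
    have hc : PySem.List.pyGet? pl (j : Int) = some c := by
      have := hidx 0 (by simp)
      simpa using this
    have hstep :
        (PySem.List.enumerate ((List.range L).map (fun i => cntF pl tl i j)) 0).map
            (fun ic => ic.2 + (if PySem.List.pyGet? tl (ic.1 + (j : Int)) ≠ some c then 1 else 0)) =
          (List.range L).map (fun i => cntF pl tl i (j + 1)) := by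
      rw [enum_map_range (fun i => cntF pl tl i j) L 0]
      rw [List.map_map]
      apply List.map_congr_left
      intro k _
      simp only [Function.comp, zero_add]
      have hsplit : PySem.List.pyRange 0 ((j : Int) + 1) 1 =
          PySem.List.pyRange 0 (j : Int) 1 ++ [(j : Int)] := by
        exact PySem.List.pyRange_one_succ_right (by positivity)
      show cntF pl tl k j + _ = cntF pl tl k (j + 1)
      unfold cntF
      rw [show ((j + 1 : Nat) : Int) = (j : Int) + 1 from by push_cast; ring, hsplit, cntL_append]
      have hone : cntL pl tl (k : Int) [(j : Int)] =
          if PySem.List.pyGet? tl ((k : Int) + (j : Int)) ≠ some c then 1 else 0 := by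
        rw [show cntL pl tl (k : Int) [(j : Int)] =
            (if PySem.List.pyGet? tl ((k : Int) + (j : Int)) ≠ PySem.List.pyGet? pl (j : Int) then 1 else 0) + 0 from cntL_cons pl tl _ _ []]
        rw [hc]; simp
      rw [hone]
    rw [hstep]
    have hrec := ih (j + 1) (fun k hk => by
      have := hidx (k + 1) (by simpa using Nat.succ_lt_succ hk)
      simpa [Nat.add_comm, Nat.add_left_comm, Int.add_comm, Int.add_left_comm, Int.add_assoc] using this)
    rw [show ((j : Int) + 1) = (((j + 1 : Nat)) : Int) from by push_cast; ring]
    rw [hrec]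
    rw [show j + 1 + cs.length = j + (c :: cs).length from by simp only [List.length_cons]; omega]

-- ===== VERDICT (by name: the statement is the Claim_ definition above) =====
theorem naive_2mm_spec : Claim_equal_naive_2mm := by
  intro p t _
  unfold Spec_naive_2mm naive_2mm naive_2mm_alt
  set pl := p.toList with hpl
  set tl := t.toList with htl
  set L : Nat := ((tl.length : Int) - (pl.length : Int) + 1).toNat with hL
  -- A side
  rw [naiveOuterA_eq]
  simp only [List.nil_append]
  -- B side: initial counts, fold, final filter
  have hzero : ∀ i : Nat, cntF pl tl i 0 = 0 := by
    intro i
    simp [cntF, cntL]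
  have hinit : (List.replicate L (0 : Int)) = (List.range L).map (fun i => cntF pl tl i 0) := by
    rw [List.map_congr_left (fun i _ => hzero i)]
    simp [List.map_const']
  rw [hinit]
  have hfold := foldB_gen pl tl L pl 0 (fun k hk => by
    rw [show ((0 : Nat) : Int) + (k : Int) = ((k : Nat) : Int) from by push_cast; ring]
    exact PySem.List.pyGet?_ofNat pl k hk)
  rw [show ((0 : Nat) : Int) = (0 : Int) from rfl] at hfold
  rw [hfold]
  simp only [Nat.zero_add]
  rw [enum_map_range (fun i => cntF pl tl i pl.length) L 0]
  rw [List.filter_map, List.map_map]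
  rw [PySem.List.pyRange_one 0 ((tl.length : Int) - (pl.length : Int) + 1)]
  rw [show ((tl.length : Int) - (pl.length : Int) + 1 - 0).toNat = L from by rw [hL]; ring_nf]
  rw [List.filter_map]
  simp [cntF, Function.comp_def]
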